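-- pv_equiv track=rewrite | github.com/jwilliams2023/Open-Card-Preapproval-Tool | src/scrapers/master_scraper.py | is_card_contextually_relevant
-- ===== SOURCE A (Python) =====
-- def is_card_contextually_relevant(text, card_terms, decision_terms):
--     tokens = text.lower().split()
--     for i, token in enumerate(tokens):
--         if any(card in token for card in card_terms):
--             window = tokens[max(i - 12, 0):i + 13]
--             if any(decision in w for decision in decision_terms for w in window):
--                 return True
--     return False
-- ===== SOURCE B (Python) =====
-- def is_card_contextually_relevant(text, card_terms, decision_terms):
--     tokens = text.lower().split()
--     card_positions = [i for i, tok in enumerate(tokens)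
--                       if any(card in tok for card in card_terms)]
--     decision_positions = [j for j, tok in enumerate(tokens)
--                           if any(decision in tok for decision in decision_terms)]
--     return any(abs(i - j) <= 12
--                for i in card_positions for j in decision_positions)
-- ===== Notes on version B (the rewrite author's own statement) =====
-- stated objective: alternative
-- what changed: Instead of scanning a 25-token window around every card hit, B makes one pass collecting card-match indices and one pass collecting decision-match indices, then tests whether some pair of indices lies within distance 12.
import Mathlib
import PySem

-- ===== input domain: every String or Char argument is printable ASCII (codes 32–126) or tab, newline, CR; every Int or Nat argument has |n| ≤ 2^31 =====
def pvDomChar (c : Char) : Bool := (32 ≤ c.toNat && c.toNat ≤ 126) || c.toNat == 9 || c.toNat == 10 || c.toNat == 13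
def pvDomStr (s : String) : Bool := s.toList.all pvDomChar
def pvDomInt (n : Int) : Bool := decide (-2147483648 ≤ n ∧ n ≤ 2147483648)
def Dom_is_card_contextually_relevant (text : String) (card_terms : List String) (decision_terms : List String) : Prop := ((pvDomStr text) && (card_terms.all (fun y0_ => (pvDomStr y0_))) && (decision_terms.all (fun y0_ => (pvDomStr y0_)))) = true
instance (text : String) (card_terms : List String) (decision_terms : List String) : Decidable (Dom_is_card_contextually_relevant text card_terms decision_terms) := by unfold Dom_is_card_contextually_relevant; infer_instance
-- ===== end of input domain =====

-- B replaces A's per-hit 25-token window scan by two index-collecting passes plus a pair distance test (alternative decomposition, same results).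


-- ===== PORT A =====
-- tokens = text.lower().split(); for i, token in enumerate(tokens): if any(card in token …):
--   window = tokens[max(i-12,0):i+13]; if any(decision in w …): return True; return False
def is_card_contextually_relevant (text : String) (card_terms : List String) (decision_terms : List String) : Bool :=
  let tokens := PySem.Str.split₀ (PySem.Str.lower text)
  (PySem.List.enumerate tokens).any (fun p =>
    (card_terms.any (fun card => PySem.Str.isIn card p.2)) &&
    (let window := PySem.List.slice tokens (some (max (p.1 - 12) 0)) (some (p.1 + 13))
     decision_terms.any (fun decision => window.any (fun w => PySem.Str.isIn decision w))))

-- ===== PORT B =====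
-- one pass for card-match indices, one pass for decision-match indices, then a pair distance test
def is_card_contextually_relevant_alt (text : String) (card_terms : List String) (decision_terms : List String) : Bool :=
  let tokens := PySem.Str.split₀ (PySem.Str.lower text)
  let card_positions := ((PySem.List.enumerate tokens).filter
      (fun p => card_terms.any (fun card => PySem.Str.isIn card p.2))).map (·.1)
  let decision_positions := ((PySem.List.enumerate tokens).filter
      (fun p => decision_terms.any (fun decision => PySem.Str.isIn decision p.2))).map (·.1)
  card_positions.any (fun i => decision_positions.any (fun j => (i - j).natAbs ≤ 12))

-- ===== PRECONDITION & SPEC =====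
def Spec_is_card_contextually_relevant (text : String) (card_terms : List String) (decision_terms : List String) (out : Bool) : Prop := out = is_card_contextually_relevant_alt text card_terms decision_terms
instance (text : String) (card_terms : List String) (decision_terms : List String) (out : Bool) : Decidable (Spec_is_card_contextually_relevant text card_terms decision_terms out) := by unfold Spec_is_card_contextually_relevant; infer_instance

-- ===== CLAIM (what is proved, stated in full; the proofs are below) =====
def Claim_equal_is_card_contextually_relevant : Prop := ∀ (text : String) (card_terms : List String) (decision_terms : List String), Dom_is_card_contextually_relevant text card_terms decision_terms → Spec_is_card_contextually_relevant text card_terms decision_terms (is_card_contextually_relevant text card_terms decision_terms)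

-- ===== LEMMAS AND PROOFS =====

-- membership in PySem.List.enumerate (no such lemma in the prelude)
theorem pv_mem_enumerate_iff {α : Type} (xs : List α) (s : Int) (p : Int × α) :
    p ∈ PySem.List.enumerate xs s ↔ ∃ k : Nat, ∃ h : k < xs.length, p.1 = s + k ∧ p.2 = xs[k] := by
  induction xs generalizing s with
  | nil => simp [PySem.List.enumerate]
  | cons x xs ih =>
    rw [PySem.List.enumerate_cons]
    constructor
    · intro h
      rcases List.mem_cons.mp h with h | h
      · exact ⟨0, by simp, by simp [h], by simp [h]⟩
      · rcases (ih (s + 1)).mp h with ⟨k, hk, h1, h2⟩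
        exact ⟨k + 1, by simpa using hk, by push_cast at h1 ⊢; omega, by simpa using h2⟩
    · rintro ⟨k, hk, h1, h2⟩
      cases k with
      | zero =>
        apply List.mem_cons.mpr; left
        cases p; simp_all
      | succ k =>
        apply List.mem_cons.mpr; right
        exact (ih (s + 1)).mpr ⟨k, by simpa using hk, by push_cast at h1 ⊢; omega, by simpa using h2⟩

-- membership in A's window slice around token k, phrased as an index-distance condition
theorem pv_mem_window_iff (ts : List String) (k : Nat) (w : String) :
    w ∈ PySem.List.slice ts (some (max ((k : Int) - 12) 0)) (some ((k : Int) + 13)) ↔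
      ∃ j : Nat, ∃ h : j < ts.length, ((k : Int) - (j : Int)).natAbs ≤ 12 ∧ w = ts[j] := by
  have ha : (0 : Int) ≤ max ((k : Int) - 12) 0 := le_max_right _ _
  have hb : (0 : Int) ≤ (k : Int) + 13 := by positivity
  rw [PySem.List.slice_toNat ts ha hb]
  rw [List.mem_iff_getElem]
  constructor
  · rintro ⟨j, hj, hget⟩
    simp only [List.length_take, List.length_drop, lt_min_iff] at hj
    refine ⟨(max ((k : Int) - 12) 0).toNat + j, by omega, by omega, ?_⟩
    rw [List.getElem_take, List.getElem_drop] at hget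
    exact hget.symm
  · rintro ⟨j, hjlt, hdist, hw⟩
    have hge : (max ((k : Int) - 12) 0).toNat ≤ j := by omega
    refine ⟨j - (max ((k : Int) - 12) 0).toNat, ?_, ?_⟩
    · simp only [List.length_take, List.length_drop, lt_min_iff]
      omega
    · rw [List.getElem_take, List.getElem_drop]
      rw [hw]; congr 1; omega

theorem pv_main (ts : List String) (cts dts : List String) :
    (PySem.List.enumerate ts).any (fun p =>
        (cts.any (fun card => PySem.Str.isIn card p.2)) &&
        (dts.any (fun decision =>
          (PySem.List.slice ts (some (max (p.1 - 12) 0)) (some (p.1 + 13))).any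
            (fun w => PySem.Str.isIn decision w)))) =
    (((PySem.List.enumerate ts).filter (fun p => cts.any (fun card => PySem.Str.isIn card p.2))).map (·.1)).any (fun i =>
        (((PySem.List.enumerate ts).filter (fun p => dts.any (fun decision => PySem.Str.isIn decision p.2))).map (·.1)).any (fun j =>
          (i - j).natAbs ≤ 12)) := by
  rw [Bool.eq_iff_iff]
  simp only [List.any_eq_true, List.mem_map, List.mem_filter, Bool.and_eq_true, decide_eq_true_eq]
  constructor
  · rintro ⟨p, hp, hC, d, hd, w, hw, hisin⟩
    rcases (pv_mem_enumerate_iff ts 0 p).mp hp with ⟨k, hklt, h1, h2⟩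
    have h1' : p.1 = (k : Int) := by omega
    rw [h1'] at hw
    rcases (pv_mem_window_iff ts k w).mp hw with ⟨j, hjlt, hdist, hwj⟩
    refine ⟨(k : Int), ⟨p, ⟨hp, hC⟩, h1'⟩, (j : Int),
      ⟨((j : Int), ts[j]), ⟨(pv_mem_enumerate_iff ts 0 _).mpr ⟨j, hjlt, by omega, rfl⟩,
        ⟨d, hd, by rw [hwj] at hisin; exact hisin⟩⟩, rfl⟩, hdist⟩
  · rintro ⟨i, ⟨p, ⟨hp, hC⟩, hpi⟩, j, ⟨q, ⟨hq, ⟨d, hd, hisin⟩⟩, hqj⟩, hdist⟩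
    rcases (pv_mem_enumerate_iff ts 0 p).mp hp with ⟨k, hklt, h1, h2⟩
    rcases (pv_mem_enumerate_iff ts 0 q).mp hq with ⟨l, hllt, h3, h4⟩
    have h1' : p.1 = (k : Int) := by omega
    refine ⟨p, hp, hC, d, hd, ts[l], ?_, by rw [← h4]; exact hisin⟩
    rw [h1']
    exact (pv_mem_window_iff ts k _).mpr ⟨l, hllt, by omega, rfl⟩

-- ===== VERDICT (by name: the statement is the Claim_ definition above) =====
theorem is_card_contextually_relevant_spec : Claim_equal_is_card_contextually_relevant := by
  intro text card_terms decision_terms _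
  unfold Spec_is_card_contextually_relevant
  unfold is_card_contextually_relevant is_card_contextually_relevant_alt
  exact pv_main (PySem.Str.split₀ (PySem.Str.lower text)) card_terms decision_terms
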